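-- pv_equiv track=rewrite | github.com/Spiderasasen/algorithms-with-python | sorting/heaps.py | max_heap_steps
-- ===== SOURCE A (Python) =====
-- from typing import List, Generator, Tuple
--
-- def max_heapify(array: List[int], n: int, i: int) -> Generator[Tuple[List, int, int], None, None]:
--     largest: int = i
--     left: int = 2*i + 1
--     right: int = 2*i + 2
--     if left < n: #comparing the parent to the left side of the element
--         yield (array.copy(), i, left)
--         if array[left] > array[largest]:
--             largest = left
--
--     if right < n: #compaing the parent to the right side of the element
--         yield (array.copy(), i, right)
--         if array[right] > array[largest]:
--             largest = right
--
--     if largest != i: #there is no parents that have a higher cost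
--         array[i], array[largest] = array[largest], array[i]
--         yield(array.copy(), i, largest)
--
--         yield from max_heapify(array, n, largest)
--
-- def max_heap_steps(array: List[int]) -> Generator[Tuple[List, int, int], None, None]:
--     n = len(array)
--
--     #building the max heap
--     for i in range(n // 2 - 1, -1, -1):
--         yield from max_heapify(array, n, i)
--
--     #extract from element
--     for i in range(n - 1, 0, -1):
--         array[0], array[i] = array[i], array[0]
--         yield (array.copy(), 0, i)
--         yield from max_heapify(array, i, 0)
-- ===== SOURCE B (Python) =====
-- # Iterative sift-down loop (with a small for over the two children) replacing
-- # the recursive max_heapify; like A, it sorts `array` in place while yielding.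
-- def _sift_down(array, n, i):
--     while True:
--         largest = i
--         for child in (2 * i + 1, 2 * i + 2):
--             if child < n:
--                 yield (array.copy(), i, child)
--                 if array[child] > array[largest]:
--                     largest = child
--         if largest == i:
--             return
--         array[i], array[largest] = array[largest], array[i]
--         yield (array.copy(), i, largest)
--         i = largest
--
-- def max_heap_steps(array):
--     n = len(array)
--     for start in range(n // 2 - 1, -1, -1):
--         yield from _sift_down(array, n, start)
--     for end in range(n - 1, 0, -1):
--         array[0], array[end] = array[end], array[0]
--         yield (array.copy(), 0, end)
--         yield from _sift_down(array, end, 0)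
-- ===== Notes on version B (the rewrite author's own statement) =====
-- stated objective: alternative
-- what changed: The recursive max_heapify is replaced by an iterative sift-down: a while loop that folds over the two children of the current node (yielding the same comparison snapshots), swaps, and continues from the child index, instead of recursing.
import Mathlib
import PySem

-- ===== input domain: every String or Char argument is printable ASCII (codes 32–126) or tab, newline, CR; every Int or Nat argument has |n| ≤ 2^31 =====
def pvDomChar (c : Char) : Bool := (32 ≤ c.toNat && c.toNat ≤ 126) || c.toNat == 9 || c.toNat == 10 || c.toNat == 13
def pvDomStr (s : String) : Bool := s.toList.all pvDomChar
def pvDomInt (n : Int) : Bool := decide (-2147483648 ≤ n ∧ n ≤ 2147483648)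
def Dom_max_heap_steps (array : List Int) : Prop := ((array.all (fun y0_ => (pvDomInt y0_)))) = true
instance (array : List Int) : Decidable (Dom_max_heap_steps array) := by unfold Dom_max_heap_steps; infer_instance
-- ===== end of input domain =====

-- B replaces A's recursive max_heapify by an iterative sift-down loop (a while
-- loop with a small for over the two children), accumulating the yielded steps;
-- both Pythons mutate `array` in place, the equivalence proved is about the
-- yielded trace. Objective: alternative decomposition (same cost).

-- swap array[i] and array[j] (both in range whenever the algorithm does it)
def pvSwap (a : List Int) (i j : Nat) : List Int :=
  (a.set i (a.getD j 0)).set j (a.getD i 0)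

-- ===== PORT A =====
-- recursive max_heapify; fuel (= the n passed at each top-level call) only
-- makes the recursion structural — it is never exhausted, since the node index
-- strictly increases and stays below n.
def pvHeapifyA : Nat → List Int → Nat → Nat → List Int × List (List Int × Int × Int)
  | 0, array, _, _ => (array, [])
  | fuel+1, array, n, i =>
    let left := 2*i + 1
    let right := 2*i + 2
    let p1 : Nat × List (List Int × Int × Int) :=
      if left < n then
        ((if array.getD left 0 > array.getD i 0 then left else i),
         [(array, (i : Int), (left : Int))])
      else (i, [])
    let p2 : Nat × List (List Int × Int × Int) :=
      if right < n then
        ((if array.getD right 0 > array.getD p1.1 0 then right else p1.1),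
         p1.2 ++ [(array, (i : Int), (right : Int))])
      else p1
    if p2.1 ≠ i then
      let arr2 := pvSwap array i p2.1
      let rest := pvHeapifyA fuel arr2 n p2.1
      (rest.1, (p2.2 ++ [(arr2, (i : Int), (p2.1 : Int))]) ++ rest.2)
    else (array, p2.2)

def max_heap_steps (array : List Int) : List (List Int × Int × Int) :=
  let n := array.length
  -- building the max heap: for i in range(n//2 - 1, -1, -1)
  let st1 := ((List.range (n / 2)).reverse).foldl
    (fun (st : List Int × List (List Int × Int × Int)) i =>
      let r := pvHeapifyA n st.1 n i
      (r.1, st.2 ++ r.2)) (array, [])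
  -- extract: for i in range(n - 1, 0, -1)
  let st2 := (((List.range (n - 1)).map (· + 1)).reverse).foldl
    (fun (st : List Int × List (List Int × Int × Int)) i =>
      let a := pvSwap st.1 0 i
      let r := pvHeapifyA i a i 0
      (r.1, (st.2 ++ [(a, (0 : Int), (i : Int))]) ++ r.2)) st1
  st2.2

-- ===== PORT B =====
-- inner `for child in (2*i+1, 2*i+2)` body of the while loop
def pvChildStep (array : List Int) (n i : Nat)
    (st : Nat × List (List Int × Int × Int)) (child : Nat) :
    Nat × List (List Int × Int × Int) :=
  if child < n then
    ((if array.getD child 0 > array.getD st.1 0 then child else st.1),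
     st.2 ++ [(array, (i : Int), (child : Int))])
  else st

-- tail-recursive while-loop with an accumulator of yielded steps
def pvSiftB : Nat → List Int → Nat → Nat → List (List Int × Int × Int) →
    List Int × List (List Int × Int × Int)
  | 0, array, _, _, acc => (array, acc)
  | fuel+1, array, n, i, acc =>
    let st := [2*i + 1, 2*i + 2].foldl (pvChildStep array n i) (i, [])
    if st.1 = i then (array, acc ++ st.2)
    else
      let arr2 := pvSwap array i st.1
      pvSiftB fuel arr2 n st.1 (acc ++ st.2 ++ [(arr2, (i : Int), (st.1 : Int))])

def max_heap_steps_alt (array : List Int) : List (List Int × Int × Int) :=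
  let n := array.length
  let st1 := ((List.range (n / 2)).reverse).foldl
    (fun (st : List Int × List (List Int × Int × Int)) start =>
      pvSiftB n st.1 n start st.2) (array, [])
  let st2 := (((List.range (n - 1)).map (· + 1)).reverse).foldl
    (fun (st : List Int × List (List Int × Int × Int)) e =>
      let a := pvSwap st.1 0 e
      pvSiftB e a e 0 (st.2 ++ [(a, (0 : Int), (e : Int))])) st1
  st2.2

-- ===== PRECONDITION & SPEC =====
def Spec_max_heap_steps (array : List Int) (out : List (List Int × Int × Int)) : Prop := out = max_heap_steps_alt array
instance (array : List Int) (out : List (List Int × Int × Int)) : Decidable (Spec_max_heap_steps array out) := by unfold Spec_max_heap_steps; infer_instance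

-- ===== CLAIM (what is proved, stated in full; the proofs are below) =====
def Claim_equal_max_heap_steps : Prop := ∀ (array : List Int), Dom_max_heap_steps array → Spec_max_heap_steps array (max_heap_steps array)

-- ===== LEMMAS AND PROOFS =====

-- the iterative sift equals the recursive heapify, threading the accumulator
theorem pvSiftB_eq (fuel : Nat) :
    ∀ (array : List Int) (n i : Nat) (acc : List (List Int × Int × Int)),
      pvSiftB fuel array n i acc =
        ((pvHeapifyA fuel array n i).1, acc ++ (pvHeapifyA fuel array n i).2) := by
  induction fuel with
  | zero => intro array n i acc; simp [pvSiftB, pvHeapifyA]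
  | succ fuel ih =>
    intro array n i acc
    simp only [pvSiftB, pvHeapifyA, List.foldl, pvChildStep]
    by_cases hl : 2*i + 1 < n <;> by_cases hr : 2*i + 2 < n <;>
      simp only [hl, hr, if_true, if_false, List.nil_append] <;>
      split_ifs <;> (try simp only [ih]) <;> simp_all

theorem max_heap_steps_spec : Claim_equal_max_heap_steps := by
  intro array _
  show max_heap_steps array = max_heap_steps_alt array
  unfold max_heap_steps max_heap_steps_alt
  simp only [pvSiftB_eq]

-- ===== VERDICT (by name: the statement is the Claim_ definition above) =====
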